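-- pv_equiv track=rewrite | github.com/Dj-Shortcut/leadscraper | src/transform.py | bucket_from_nace
-- ===== SOURCE A (Python) =====
-- from typing import Optional
--
-- _NACE_PREFIX_BUCKETS: tuple[tuple[str, str], ...] = (
--     ("96.02", "beauty"),  # hair and beauty treatment
--     ("56", "horeca"),
--     ("86", "health"),
--     ("47", "retail"),
--     ("43", "service_trades"),
--     ("81", "service_trades"),
--     ("95", "service_trades"),
-- )
--
-- def normalize_nace_code(nace_code: Optional[str]) -> str:
--     """Normalize a raw NACE code into comparable dotted-string form."""
--     if nace_code is None:
--         return ""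
--     return str(nace_code).strip().upper().replace(",", ".")
--
-- def bucket_from_nace(nace_code: Optional[str]) -> str:
--     """Return one of: beauty, horeca, health, retail, service_trades, other."""
--     normalized = normalize_nace_code(nace_code)
--     if not normalized:
--         return "other"
--
--     for prefix, bucket in _NACE_PREFIX_BUCKETS:
--         if normalized.startswith(prefix):
--             return bucket
--
--     return "other"
-- ===== SOURCE B (Python) =====
-- from typing import Optional
--
-- _NACE_LONG: dict[str, str] = {"96.02": "beauty"}
-- _NACE_SHORT: dict[str, str] = {
--     "56": "horeca",
--     "86": "health",
--     "47": "retail",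
--     "43": "service_trades",
--     "81": "service_trades",
--     "95": "service_trades",
-- }
--
-- def normalize_nace_code(nace_code: Optional[str]) -> str:
--     """Normalize a raw NACE code into comparable dotted-string form."""
--     if nace_code is None:
--         return ""
--     return str(nace_code).strip().upper().replace(",", ".")
--
-- def bucket_from_nace(nace_code: Optional[str]) -> str:
--     """Return one of: beauty, horeca, health, retail, service_trades, other."""
--     normalized = normalize_nace_code(nace_code)
--     if not normalized:
--         return "other"
--     bucket = _NACE_LONG.get(normalized[:5])
--     if bucket is not None:
--         return bucket
--     return _NACE_SHORT.get(normalized[:2], "other")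
-- ===== Notes on version B (the rewrite author's own statement) =====
-- stated objective: idiomatic
-- what changed: Replaces the priority loop over a prefix/bucket tuple table with two length-grouped dict lookups: the 5-char key is tried via normalized[:5], then the 2-char keys via normalized[:2] with a default, eliminating the startswith scan.
import Mathlib
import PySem

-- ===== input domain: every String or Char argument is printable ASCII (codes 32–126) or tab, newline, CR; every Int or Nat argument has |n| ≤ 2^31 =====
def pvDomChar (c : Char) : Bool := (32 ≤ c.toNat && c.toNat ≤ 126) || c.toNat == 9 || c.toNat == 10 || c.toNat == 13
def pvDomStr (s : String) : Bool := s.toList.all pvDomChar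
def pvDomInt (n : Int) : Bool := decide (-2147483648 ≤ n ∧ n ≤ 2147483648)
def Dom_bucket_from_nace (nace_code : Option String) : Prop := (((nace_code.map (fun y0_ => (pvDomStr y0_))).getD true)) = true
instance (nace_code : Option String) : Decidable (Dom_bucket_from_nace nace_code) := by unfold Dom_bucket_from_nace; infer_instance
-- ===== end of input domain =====

-- B replaces A's priority loop over a prefix table with two length-grouped dict lookups
-- (normalized[:5] in the long map, else normalized[:2] in the short map) — idiomatic, same values.

-- ===== PORT A =====
def pvNaceTable : List (String × String) :=
  [("96.02", "beauty"), ("56", "horeca"), ("86", "health"), ("47", "retail"),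
   ("43", "service_trades"), ("81", "service_trades"), ("95", "service_trades")]

def normalize_nace_code (nace_code : Option String) : String :=
  match nace_code with
  | none => ""
  | some s => PySem.Str.replace (PySem.Str.upper (PySem.Str.strip s)) "," "."

def pvBucketLoop (normalized : String) : List (String × String) → String
  | [] => "other"
  | (pfx, bucket) :: rest =>
      if PySem.Str.startswith normalized pfx then bucket else pvBucketLoop normalized rest

def bucket_from_nace (nace_code : Option String) : String :=
  let normalized := normalize_nace_code nace_code
  if normalized = "" then "other"
  else pvBucketLoop normalized pvNaceTable

-- ===== PORT B =====
def pvNaceLong : PySem.Dict String String := PySem.Dict.ofList [("96.02", "beauty")]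

def pvNaceShort : PySem.Dict String String :=
  PySem.Dict.ofList
    [("56", "horeca"), ("86", "health"), ("47", "retail"),
     ("43", "service_trades"), ("81", "service_trades"), ("95", "service_trades")]

def bucket_from_nace_alt (nace_code : Option String) : String :=
  let normalized := normalize_nace_code nace_code
  if normalized = "" then "other"
  else
    match pvNaceLong.get? (PySem.Str.slice normalized none (some 5)) with
    | some bucket => bucket
    | none => pvNaceShort.getD (PySem.Str.slice normalized none (some 2)) "other"

-- ===== PRECONDITION & SPEC =====
def Spec_bucket_from_nace (nace_code : Option String) (out : String) : Prop := out = bucket_from_nace_alt nace_code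
instance (nace_code : Option String) (out : String) : Decidable (Spec_bucket_from_nace nace_code out) := by unfold Spec_bucket_from_nace; infer_instance

-- ===== CLAIM (what is proved, stated in full; the proofs are below) =====
def Claim_equal_bucket_from_nace : Prop := ∀ (nace_code : Option String), Dom_bucket_from_nace nace_code → Spec_bucket_from_nace nace_code (bucket_from_nace nace_code)

-- ===== LEMMAS AND PROOFS =====

-- a prefix test equals an equality test on the slice of the prefix's length
lemma beq_slice_eq_startswith (n p : String) (i : Int) (h0 : 0 ≤ i)
    (hk : p.toList.length = i.toNat) :
    (p == PySem.Str.slice n none (some i)) = PySem.Str.startswith n p := by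
  rw [Bool.eq_iff_iff, beq_iff_eq]
  constructor
  · intro h
    rw [PySem.Str.startswith_eq, PySem.Chars.startswith_iff, List.prefix_iff_eq_take, hk, h]
    simp [PySem.Str.toList_slice, PySem.Chars.slice_eq_listSlice, PySem.List.slice_to _ h0]
  · intro h
    rw [PySem.Str.startswith_eq, PySem.Chars.startswith_iff, List.prefix_iff_eq_take, hk] at h
    apply String.toList_injective
    simp [PySem.Str.toList_slice, PySem.Chars.slice_eq_listSlice, PySem.List.slice_to _ h0, ← h]

lemma startswith_take (l p : List Char) (k : Nat) (hk : p.length = k) :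
    PySem.Chars.startswith l p = decide (l.take k = p) := by
  rw [Bool.eq_iff_iff, PySem.Chars.startswith_iff, List.prefix_iff_eq_take, hk]
  simp [eq_comm]

lemma loop_eq_lookups (n : String) :
    pvBucketLoop n pvNaceTable =
      (match pvNaceLong.get? (PySem.Str.slice n none (some 5)) with
       | some bucket => bucket
       | none => pvNaceShort.getD (PySem.Str.slice n none (some 2)) "other") := by
  have hL : pvNaceLong = PySem.Dict.mk [("96.02", "beauty")] := by decide
  have hS : pvNaceShort = PySem.Dict.mk
      [("56", "horeca"), ("86", "health"), ("47", "retail"),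
       ("43", "service_trades"), ("81", "service_trades"), ("95", "service_trades")] := by decide
  rw [hL, hS]
  simp only [pvBucketLoop, pvNaceTable, PySem.Dict.getD, PySem.Dict.get?_mk_cons,
    beq_slice_eq_startswith n "96.02" 5 (by decide) (by decide),
    beq_slice_eq_startswith n "56" 2 (by decide) (by decide),
    beq_slice_eq_startswith n "86" 2 (by decide) (by decide),
    beq_slice_eq_startswith n "47" 2 (by decide) (by decide),
    beq_slice_eq_startswith n "43" 2 (by decide) (by decide),
    beq_slice_eq_startswith n "81" 2 (by decide) (by decide),
    beq_slice_eq_startswith n "95" 2 (by decide) (by decide),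
    PySem.Str.startswith_eq,
    startswith_take n.toList "96.02".toList 5 (by decide),
    startswith_take n.toList "56".toList 2 (by decide),
    startswith_take n.toList "86".toList 2 (by decide),
    startswith_take n.toList "47".toList 2 (by decide),
    startswith_take n.toList "43".toList 2 (by decide),
    startswith_take n.toList "81".toList 2 (by decide),
    startswith_take n.toList "95".toList 2 (by decide)]
  by_cases h1 : n.toList.take 5 = "96.02".toList
  · simp [h1]
  · by_cases h2 : n.toList.take 2 = "56".toList <;>
      by_cases h3 : n.toList.take 2 = "86".toList <;>
        by_cases h4 : n.toList.take 2 = "47".toList <;>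
          by_cases h5 : n.toList.take 2 = "43".toList <;>
            by_cases h6 : n.toList.take 2 = "81".toList <;>
              by_cases h7 : n.toList.take 2 = "95".toList <;>
                simp_all [PySem.Dict.get?]

-- ===== VERDICT (by name: the statement is the Claim_ definition above) =====
theorem bucket_from_nace_spec : Claim_equal_bucket_from_nace := by
  intro nace_code _
  unfold Spec_bucket_from_nace bucket_from_nace bucket_from_nace_alt
  by_cases h : normalize_nace_code nace_code = "" <;>
    simp [h, loop_eq_lookups]
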